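-- pv_equiv track=rewrite | github.com/gns0314/codestudy | 프로그래머스/1/118666. 성격 유형 검사하기/성격 유형 검사하기.py | solution
-- ===== SOURCE A (Python) =====
-- def solution(survey, choices):
--     score = {1:3, 2:2, 3:1, 4:0, 5:1, 6:2, 7:3}
--     test = {'R':0, 'T':0, 'C':0, 'F':0, 'J':0, 'M':0, 'A':0, 'N':0}
--     tmp = []
--     answer = ''
--     for i in range(len(survey)):
--         if choices[i] > 4:
--             tmp += [survey[i][1],score[choices[i]]]
--         elif choices[i] < 4:
--             tmp += [survey[i][0],score[choices[i]]]
--     for i in range(len(tmp)-1):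
--         if i % 2 == 0:
--             test[tmp[i]] += tmp[i+1]
--     for i in range(0, len(test), 2):
--         first_key, second_key = list(test.keys())[i], list(test.keys())[i + 1]
--         first_value, second_value = test[first_key], test[second_key]
--
--         if first_value > second_value:
--             answer += first_key
--         elif first_value < second_value:
--             answer += second_key
--         else:
--             answer += first_key
--
--     return answer
-- ===== SOURCE B (Python) =====
-- def solution(survey, choices):
--     score = {1: 3, 2: 2, 3: 1, 4: 0, 5: 1, 6: 2, 7: 3}
--     pairs = [('R', 'T'), ('C', 'F'), ('J', 'M'), ('A', 'N')]
--     side = {}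
--     for a, b in pairs:
--         side[a] = (a + b, 1)
--         side[b] = (a + b, -1)
--     net = {a + b: 0 for a, b in pairs}
--     for i in range(len(survey)):
--         c = choices[i]
--         if c > 4:
--             p, s = side[survey[i][1]]
--             net[p] += s * score[c]
--         elif c < 4:
--             p, s = side[survey[i][0]]
--             net[p] += s * score[c]
--     return ''.join(a if net[a + b] >= 0 else b for a, b in pairs)
-- ===== Notes on version B (the rewrite author's own statement) =====
-- stated objective: simpler
-- what changed: Replaces A's three-phase pipeline (a mixed letter/score scratch list, an index-parity loop accumulating eight per-letter counts, then a keys()-indexing pass) with one pass keeping four signed net accumulators keyed by trait pair via a letter->(pair,sign) map, emitting the answer with a join over the pairs.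
import Mathlib
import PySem

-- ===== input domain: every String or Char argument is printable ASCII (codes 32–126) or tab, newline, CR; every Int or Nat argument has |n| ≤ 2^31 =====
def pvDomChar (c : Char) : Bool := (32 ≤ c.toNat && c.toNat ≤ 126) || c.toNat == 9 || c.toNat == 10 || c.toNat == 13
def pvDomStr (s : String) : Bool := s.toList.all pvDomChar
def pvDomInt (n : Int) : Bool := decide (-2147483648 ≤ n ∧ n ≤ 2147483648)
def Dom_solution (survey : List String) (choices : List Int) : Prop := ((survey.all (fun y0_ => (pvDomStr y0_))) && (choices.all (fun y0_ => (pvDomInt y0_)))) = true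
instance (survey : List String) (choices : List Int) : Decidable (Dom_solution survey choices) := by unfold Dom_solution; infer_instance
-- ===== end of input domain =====

-- B replaces A's three-phase pipeline (mixed letter/score scratch list, parity-indexed
-- per-letter counting, keys()-indexing output pass) with one pass over four signed net
-- accumulators keyed by trait pair; objective: simpler.

-- ===== PORT A =====
-- the score dict literal of A
def scoreDictA : PySem.Dict Int Int :=
  PySem.Dict.ofList [(1,3),(2,2),(3,1),(4,0),(5,1),(6,2),(7,3)]

-- port of A; the mixed-type Python list `tmp` (letters alternating with scores) is
-- modelled as List (Char ⊕ Int); the `match` fallbacks are exact wherever Python does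
-- not raise (inside Pre_solution)
def solution (survey : List String) (choices : List Int) : String :=
  let score := scoreDictA
  let test0 : PySem.Dict Char Int :=
    PySem.Dict.ofList [('R',0),('T',0),('C',0),('F',0),('J',0),('M',0),('A',0),('N',0)]
  let tmp : List (Char ⊕ Int) :=
    (PySem.List.pyRange 0 (survey.length : Int) 1).foldl (fun tmp i =>
      if PySem.List.pyGetD choices i 0 > 4 then
        tmp ++ [Sum.inl ((PySem.Str.pyGet? (PySem.List.pyGetD survey i "") 1).getD ' '),
                Sum.inr (score.getD (PySem.List.pyGetD choices i 0) 0)]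
      else if PySem.List.pyGetD choices i 0 < 4 then
        tmp ++ [Sum.inl ((PySem.Str.pyGet? (PySem.List.pyGetD survey i "") 0).getD ' '),
                Sum.inr (score.getD (PySem.List.pyGetD choices i 0) 0)]
      else tmp) []
  let test :=
    (PySem.List.pyRange 0 ((tmp.length : Int) - 1) 1).foldl (fun test i =>
      if i % 2 == 0 then
        match PySem.List.pyGet? tmp i, PySem.List.pyGet? tmp (i + 1) with
        | some (Sum.inl ch), some (Sum.inr v) => test.modify ch 0 (· + v)
        | _, _ => test
      else test) test0
  (PySem.List.pyRange 0 (test.size : Int) 2).foldl (fun answer i =>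
    let firstKey := PySem.List.pyGetD test.keys i ' '
    let secondKey := PySem.List.pyGetD test.keys (i + 1) ' '
    let firstValue := test.getD firstKey 0
    let secondValue := test.getD secondKey 0
    if firstValue > secondValue then answer ++ String.ofList [firstKey]
    else if firstValue < secondValue then answer ++ String.ofList [secondKey]
    else answer ++ String.ofList [firstKey]) ""

-- ===== PORT B =====
-- B-side literals: its own score dict and the trait pairs
def scoreDictB : PySem.Dict Int Int :=
  PySem.Dict.ofList [(1,3),(2,2),(3,1),(4,0),(5,1),(6,2),(7,3)]

def pairsB : List (Char × Char) := [('R','T'),('C','F'),('J','M'),('A','N')]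

-- port of B (Source B)
def solution_alt (survey : List String) (choices : List Int) : String :=
  let score := scoreDictB
  let side : PySem.Dict Char (String × Int) :=
    pairsB.foldl (fun d ab =>
      (d.insert ab.1 (String.ofList [ab.1, ab.2], 1)).insert ab.2 (String.ofList [ab.1, ab.2], -1))
      PySem.Dict.empty
  let net0 : PySem.Dict String Int :=
    PySem.Dict.ofList (pairsB.map (fun ab => (String.ofList [ab.1, ab.2], (0 : Int))))
  let net :=
    (PySem.List.pyRange 0 (survey.length : Int) 1).foldl (fun net i =>
      let c := PySem.List.pyGetD choices i 0
      if c > 4 then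
        let ps := (side.get? ((PySem.Str.pyGet? (PySem.List.pyGetD survey i "") 1).getD ' ')).getD ("", 0)
        net.modify ps.1 0 (· + ps.2 * score.getD c 0)
      else if c < 4 then
        let ps := (side.get? ((PySem.Str.pyGet? (PySem.List.pyGetD survey i "") 0).getD ' ')).getD ("", 0)
        net.modify ps.1 0 (· + ps.2 * score.getD c 0)
      else net) net0
  PySem.Str.join "" (pairsB.map (fun ab =>
    if net.getD (String.ofList [ab.1, ab.2]) 0 ≥ 0 then String.ofList [ab.1] else String.ofList [ab.2]))

-- ===== PRECONDITION & SPEC =====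
def pvLetters : List Char := ['R','T','C','F','J','M','A','N']

-- one survey/choice question is safe: choice 4 is skipped, otherwise the choice must be a
-- score key (1..7) and the letter A reads from the survey string must exist and be one of
-- the eight trait letters (else Python raises IndexError or KeyError)
def okQ (s : String) (c : Int) : Prop :=
  c = 4 ∨
  (5 ≤ c ∧ c ≤ 7 ∧ 2 ≤ s.toList.length ∧ s.toList.getD 1 ' ' ∈ pvLetters) ∨
  (1 ≤ c ∧ c ≤ 3 ∧ 1 ≤ s.toList.length ∧ s.toList.getD 0 ' ' ∈ pvLetters)

-- Pre_ excludes exactly the inputs where A raises: a choices list shorter than survey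
-- (IndexError) and questions whose choice/letter is invalid (KeyError/IndexError)
def Pre_solution (survey : List String) (choices : List Int) : Prop :=
  survey.length ≤ choices.length ∧ ∀ p ∈ survey.zip choices, okQ p.1 p.2

instance (survey : List String) (choices : List Int) : Decidable (Pre_solution survey choices) := by
  unfold Pre_solution okQ; infer_instance

def pvWitness_solution : List String × List Int := (["AN", "TR", "CF"], [5, 2, 4])

def Spec_solution (survey : List String) (choices : List Int) (out : String) : Prop := out = solution_alt survey choices
instance (survey : List String) (choices : List Int) (out : String) : Decidable (Spec_solution survey choices out) := by unfold Spec_solution; infer_instance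

-- ===== CLAIM (what is proved, stated in full; the proofs are below) =====
def Claim_equal_solution : Prop := ∀ (survey : List String) (choices : List Int), Dom_solution survey choices → Pre_solution survey choices → Spec_solution survey choices (solution survey choices)

-- ===== LEMMAS AND PROOFS =====

theorem aux_zip {α β γ : Type} (g : γ → α → β → γ) (dx : α) (dy : β) :
    ∀ (xs : List α) (ys : List β), xs.length ≤ ys.length → ∀ (init : γ),
    (List.range xs.length).foldl (fun acc k => g acc (xs.getD k dx) (ys.getD k dy)) init
      = (xs.zip ys).foldl (fun acc p => g acc p.1 p.2) init := by
  intro xs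
  induction xs with
  | nil => intro ys h init; simp
  | cons x xs ih =>
    intro ys h init
    cases ys with
    | nil => simp at h
    | cons y ys =>
      simp only [List.length_cons, List.range_succ_eq_map, List.foldl_cons, List.foldl_map,
        List.getD_cons_zero, List.getD_cons_succ, List.zip_cons_cons]
      exact ih ys (by simpa using h) _

-- a loop over range(len(xs)) reading xs[i] and ys[i] is a fold over xs.zip ys
theorem foldl_range_zip {α β γ : Type} (g : γ → α → β → γ) (dx : α) (dy : β) :
    ∀ (xs : List α) (ys : List β), xs.length ≤ ys.length → ∀ (init : γ),
    (PySem.List.pyRange 0 (xs.length : Int) 1).foldl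
        (fun acc i => g acc (PySem.List.pyGetD xs i dx) (PySem.List.pyGetD ys i dy)) init
      = (xs.zip ys).foldl (fun acc p => g acc p.1 p.2) init := by
  intro xs ys h init
  rw [PySem.List.pyRange_zero_nat, List.foldl_map]
  simp only [PySem.List.pyGetD_natCast]
  exact aux_zip g dx dy xs ys h init

-- per-question contribution of A: the (letter, score) pair appended to tmp, if any
def contrib (p : String × Int) : List (Char × Int) :=
  if p.2 > 4 then [((PySem.Str.pyGet? p.1 1).getD ' ', scoreDictA.getD p.2 0)]
  else if p.2 < 4 then [((PySem.Str.pyGet? p.1 0).getD ' ', scoreDictA.getD p.2 0)]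
  else []

def enc (q : Char × Int) : List (Char ⊕ Int) := [Sum.inl q.1, Sum.inr q.2]

def encode (L : List (Char × Int)) : List (Char ⊕ Int) := L.flatMap enc

-- the body of A's first loop, on a (survey string, choice) pair
def bodyA (acc : List (Char ⊕ Int)) (p : String × Int) : List (Char ⊕ Int) :=
  if p.2 > 4 then
    acc ++ [Sum.inl ((PySem.Str.pyGet? p.1 1).getD ' '), Sum.inr (scoreDictA.getD p.2 0)]
  else if p.2 < 4 then
    acc ++ [Sum.inl ((PySem.Str.pyGet? p.1 0).getD ' '), Sum.inr (scoreDictA.getD p.2 0)]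
  else acc

theorem bodyA_encode (acc : List (Char ⊕ Int)) (p : String × Int) :
    bodyA acc p = acc ++ encode (contrib p) := by
  unfold bodyA contrib encode enc
  split_ifs <;> simp

theorem tmp_eq (qs : List (String × Int)) :
    ∀ acc, qs.foldl bodyA acc = acc ++ encode (qs.flatMap contrib) := by
  induction qs with
  | nil => intro acc; simp [encode]
  | cons p qs ih =>
    intro acc
    rw [List.foldl_cons, bodyA_encode, ih]
    simp [encode]

def stepA (tmp : List (Char ⊕ Int)) (test : PySem.Dict Char Int) (i : Int) :
    PySem.Dict Char Int :=
  if i % 2 == 0 then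
    match PySem.List.pyGet? tmp i, PySem.List.pyGet? tmp (i + 1) with
    | some (Sum.inl ch), some (Sum.inr v) => test.modify ch 0 (· + v)
    | _, _ => test
  else test

theorem loop2_aux (L : List (Char × Int)) :
    ∀ (pre : List (Char ⊕ Int)) (test : PySem.Dict Char Int), pre.length % 2 = 0 →
    (PySem.List.pyRange (pre.length : Int) ((pre.length : Int) + 2 * L.length - 1) 1).foldl
      (stepA (pre ++ encode L)) test
    = L.foldl (fun t q => t.modify q.1 0 (· + q.2)) test := by
  induction L with
  | nil =>
    intro pre test _
    rw [PySem.List.pyRange_one_eq_nil (by simp)]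
    simp [encode]
  | cons q L ih =>
    intro pre test hpar
    obtain ⟨c, v⟩ := q
    have hpi : (pre.length : Int) % 2 = 0 := by omega
    have henc : pre ++ encode ((c, v) :: L) = pre ++ Sum.inl c :: Sum.inr v :: encode L := by
      simp [encode, enc]
    rw [henc]
    simp only [List.length_cons, Nat.cast_add, Nat.cast_one]
    rw [PySem.List.pyRange_one_cons (by omega)]
    rw [List.foldl_cons]
    have h1 : stepA (pre ++ Sum.inl c :: Sum.inr v :: encode L) test (pre.length : Int)
        = test.modify c 0 (· + v) := by
      unfold stepA
      have hmod : ((pre.length : Int)) % 2 == 0 := by simp [hpi]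
      rw [if_pos hmod]
      rw [PySem.List.pyGet?_append_length]
      have h2 : PySem.List.pyGet? (pre ++ Sum.inl c :: Sum.inr v :: encode L)
          ((pre.length : Int) + 1) = some (Sum.inr v) := by
        have := PySem.List.pyGet?_append_right (pre := pre)
          (ys := Sum.inl c :: Sum.inr v :: encode L) (k := 1)
        simpa using this
      rw [h2]
    rw [h1]
    have hskip :
        (PySem.List.pyRange ((pre.length : Int) + 1)
            ((pre.length : Int) + 2 * ((L.length : Int) + 1) - 1) 1).foldl
          (stepA (pre ++ Sum.inl c :: Sum.inr v :: encode L)) (test.modify c 0 (· + v))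
        = (PySem.List.pyRange ((pre.length : Int) + 2)
            ((pre.length : Int) + 2 * ((L.length : Int) + 1) - 1) 1).foldl
          (stepA (pre ++ Sum.inl c :: Sum.inr v :: encode L)) (test.modify c 0 (· + v)) := by
      by_cases hL : L = []
      · subst hL
        rw [PySem.List.pyRange_one_eq_nil (by simp only [List.length_nil, Nat.cast_zero]; omega),
            PySem.List.pyRange_one_eq_nil (by simp only [List.length_nil, Nat.cast_zero]; omega)]
      · have hlen : 1 ≤ L.length := by
          cases L with | nil => simp at hL | cons _ _ => simp
        rw [PySem.List.pyRange_one_cons (by omega), List.foldl_cons]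
        have hodd : stepA (pre ++ Sum.inl c :: Sum.inr v :: encode L)
            (test.modify c 0 (· + v)) ((pre.length : Int) + 1) = test.modify c 0 (· + v) := by
          unfold stepA
          have hm : ¬ ((((pre.length : Int) + 1) % 2 == 0) = true) := by
            have : ((pre.length : Int) + 1) % 2 = 1 := by omega
            simp [this]
          rw [if_neg hm]
        rw [hodd]
        have harith : (pre.length : Int) + 1 + 1 = (pre.length : Int) + 2 := by ring
        rw [harith]
    rw [hskip]
    have hpre' : pre ++ Sum.inl c :: Sum.inr v :: encode L
        = (pre ++ [Sum.inl c, Sum.inr v]) ++ encode L := by simp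
    have ha : ((pre.length : Int) + 2) = ((pre ++ [Sum.inl c, Sum.inr v]).length : Int) := by
      simp
    have hb : ((pre.length : Int) + 2 * ((L.length : Int) + 1) - 1)
        = (((pre ++ [Sum.inl c, Sum.inr v]).length : Int) + 2 * L.length - 1) := by
      simp; ring
    rw [ha, hb, hpre']
    rw [ih (pre ++ [Sum.inl c, Sum.inr v]) (test.modify c 0 (· + v)) (by simp; omega)]
    simp

-- A's parity-indexed second loop over the alternating list is a fold over the pairs
theorem loop2_eq (L : List (Char × Int)) (test : PySem.Dict Char Int) :
    (PySem.List.pyRange 0 (((encode L).length : Int) - 1) 1).foldl (stepA (encode L)) test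
      = L.foldl (fun t q => t.modify q.1 0 (· + q.2)) test := by
  have hlen : (encode L).length = 2 * L.length := by
    simp [encode, enc]
    induction L with
    | nil => simp
    | cons q L ih => simp; omega
  have := loop2_aux L [] test (by simp)
  simpa [hlen] using this

-- B's four net accumulators track the signed differences of A's eight counters
def rel (test : PySem.Dict Char Int) (net : PySem.Dict String Int) : Prop :=
  net.getD "RT" 0 = test.getD 'R' 0 - test.getD 'T' 0 ∧
  net.getD "CF" 0 = test.getD 'C' 0 - test.getD 'F' 0 ∧
  net.getD "JM" 0 = test.getD 'J' 0 - test.getD 'M' 0 ∧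
  net.getD "AN" 0 = test.getD 'A' 0 - test.getD 'N' 0

def sideB : PySem.Dict Char (String × Int) :=
  pairsB.foldl (fun d ab =>
    (d.insert ab.1 (String.ofList [ab.1, ab.2], 1)).insert ab.2 (String.ofList [ab.1, ab.2], -1))
    PySem.Dict.empty

-- the body of B's loop, on a (survey string, choice) pair
def netStep (net : PySem.Dict String Int) (p : String × Int) : PySem.Dict String Int :=
  if p.2 > 4 then
    let ps := (sideB.get? ((PySem.Str.pyGet? p.1 1).getD ' ')).getD ("", 0)
    net.modify ps.1 0 (· + ps.2 * scoreDictB.getD p.2 0)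
  else if p.2 < 4 then
    let ps := (sideB.get? ((PySem.Str.pyGet? p.1 0).getD ' ')).getD ("", 0)
    net.modify ps.1 0 (· + ps.2 * scoreDictB.getD p.2 0)
  else net

theorem pygetd (s : String) (i : Nat) (h : i < s.toList.length) :
    (PySem.Str.pyGet? s (i : Int)).getD ' ' = s.toList.getD i ' ' := by
  have hl : i < s.length := by rw [← String.length_toList]; exact h
  simp [PySem.Str.pyGet?, PySem.List.pyGet?, PySem.List.pyIdx?, List.getD, hl]

theorem keys_modify_contains (d : PySem.Dict Char Int) (k : Char) (h : d.contains k = true)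
    (f : Int → Int) : (d.modify k 0 f).keys = d.keys := by
  rw [PySem.Dict.keys_modify, PySem.Dict.keys_insert_of_contains]; exact h

theorem sget_R : sideB.get? 'R' = some ("RT", 1) := by decide
theorem sget_T : sideB.get? 'T' = some ("RT", -1) := by decide
theorem sget_C : sideB.get? 'C' = some ("CF", 1) := by decide
theorem sget_F : sideB.get? 'F' = some ("CF", -1) := by decide
theorem sget_J : sideB.get? 'J' = some ("JM", 1) := by decide
theorem sget_M : sideB.get? 'M' = some ("JM", -1) := by decide
theorem sget_A : sideB.get? 'A' = some ("AN", 1) := by decide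
theorem sget_N : sideB.get? 'N' = some ("AN", -1) := by decide

-- one question preserves the key list of A's dict and the count/net relation
theorem step_ok (s : String) (c : Int) (hok : okQ s c)
    (test : PySem.Dict Char Int) (net : PySem.Dict String Int)
    (hk : test.keys = pvLetters) (hr : rel test net) :
    (((contrib (s, c)).foldl (fun t q => t.modify q.1 0 (· + q.2)) test).keys = pvLetters ∧
     rel ((contrib (s, c)).foldl (fun t q => t.modify q.1 0 (· + q.2)) test) (netStep net (s, c))) := by
  obtain ⟨r1, r2, r3, r4⟩ := hr
  rcases hok with h4 | ⟨h5, h7, hlen, hmem⟩ | ⟨h1, h3, hlen, hmem⟩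
  · subst h4
    constructor
    · simpa [contrib] using hk
    · simpa [netStep, rel] using ⟨r1, r2, r3, r4⟩
  · -- c ∈ [5,7]: second letter of the question
    have hgt : c > 4 := by omega
    obtain ⟨l, hl, hlmem⟩ : ∃ l, (PySem.Str.pyGet? s (1 : Int)).getD ' ' = l ∧ l ∈ pvLetters :=
      ⟨_, pygetd s 1 (by omega), hmem⟩
    have hcontrib : contrib (s, c) = [(l, scoreDictA.getD c 0)] := by
      simp only [contrib]; rw [if_pos hgt, hl]
    have hnet : netStep net (s, c)
        = net.modify ((sideB.get? l).getD ("", 0)).1 0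
            (· + ((sideB.get? l).getD ("", 0)).2 * scoreDictA.getD c 0) := by
      simp only [netStep]; rw [if_pos hgt, hl, show scoreDictB = scoreDictA from rfl]
    rw [hcontrib, hnet, List.foldl_cons, List.foldl_nil]
    dsimp only
    fin_cases hlmem <;>
      refine ⟨by rw [keys_modify_contains _ _ (by rw [PySem.Dict.contains_iff_mem_keys, hk]; decide) _]; exact hk, ?_, ?_, ?_, ?_⟩ <;>
      simp [sget_R, sget_T, sget_C, sget_F, sget_J, sget_M, sget_A, sget_N,
        PySem.Dict.getD_modify] <;> omega
  · -- c ∈ [1,3]: first letter of the question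
    have hgt : ¬ c > 4 := by omega
    have hlt : c < 4 := by omega
    obtain ⟨l, hl, hlmem⟩ : ∃ l, (PySem.Str.pyGet? s (0 : Int)).getD ' ' = l ∧ l ∈ pvLetters :=
      ⟨_, pygetd s 0 (by omega), hmem⟩
    have hcontrib : contrib (s, c) = [(l, scoreDictA.getD c 0)] := by
      simp only [contrib]; rw [if_neg hgt, if_pos hlt, hl]
    have hnet : netStep net (s, c)
        = net.modify ((sideB.get? l).getD ("", 0)).1 0
            (· + ((sideB.get? l).getD ("", 0)).2 * scoreDictA.getD c 0) := by
      simp only [netStep]; rw [if_neg hgt, if_pos hlt, hl, show scoreDictB = scoreDictA from rfl]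
    rw [hcontrib, hnet, List.foldl_cons, List.foldl_nil]
    dsimp only
    fin_cases hlmem <;>
      refine ⟨by rw [keys_modify_contains _ _ (by rw [PySem.Dict.contains_iff_mem_keys, hk]; decide) _]; exact hk, ?_, ?_, ?_, ?_⟩ <;>
      simp [sget_R, sget_T, sget_C, sget_F, sget_J, sget_M, sget_A, sget_N,
        PySem.Dict.getD_modify] <;> omega

theorem main_inv (qs : List (String × Int)) :
    ∀ (test : PySem.Dict Char Int) (net : PySem.Dict String Int),
    (∀ p ∈ qs, okQ p.1 p.2) → test.keys = pvLetters → rel test net →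
    ((qs.flatMap contrib).foldl (fun t q => t.modify q.1 0 (· + q.2)) test).keys = pvLetters ∧
    rel ((qs.flatMap contrib).foldl (fun t q => t.modify q.1 0 (· + q.2)) test)
        (qs.foldl netStep net) := by
  induction qs with
  | nil => intro test net _ hk hr; exact ⟨hk, hr⟩
  | cons p qs ih =>
    intro test net hok hk hr
    obtain ⟨s, c⟩ := p
    rw [List.flatMap_cons, List.foldl_append, List.foldl_cons]
    obtain ⟨hk', hr'⟩ := step_ok s c (hok (s, c) (List.mem_cons_self ..)) test net hk hr
    exact ih _ _ (fun p hp => hok p (List.mem_cons_of_mem _ hp)) hk' hr'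

theorem join4 (a b c d : String) :
    PySem.Str.join "" [a, b, c, d] = (((("" ++ a) ++ b) ++ c) ++ d) := by
  apply String.ext
  simp [PySem.Str.join, PySem.Chars.join, List.intercalate]

theorem pickA (acc x y : String) (a b : Int) :
    (if a > b then acc ++ x else if a < b then acc ++ y else acc ++ x)
      = acc ++ (if a - b ≥ 0 then x else y) := by
  split_ifs <;> first | rfl | omega

-- proof-side names for the three stages of A and the two stages of B (defeq to the ports)
def test0A : PySem.Dict Char Int :=
  PySem.Dict.ofList [('R',0),('T',0),('C',0),('F',0),('J',0),('M',0),('A',0),('N',0)]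

def loop1A (survey : List String) (choices : List Int) : List (Char ⊕ Int) :=
  (PySem.List.pyRange 0 (survey.length : Int) 1).foldl (fun tmp i =>
    if PySem.List.pyGetD choices i 0 > 4 then
      tmp ++ [Sum.inl ((PySem.Str.pyGet? (PySem.List.pyGetD survey i "") 1).getD ' '),
              Sum.inr (scoreDictA.getD (PySem.List.pyGetD choices i 0) 0)]
    else if PySem.List.pyGetD choices i 0 < 4 then
      tmp ++ [Sum.inl ((PySem.Str.pyGet? (PySem.List.pyGetD survey i "") 0).getD ' '),
              Sum.inr (scoreDictA.getD (PySem.List.pyGetD choices i 0) 0)]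
    else tmp) []

def loop2A (tmp : List (Char ⊕ Int)) : PySem.Dict Char Int :=
  (PySem.List.pyRange 0 ((tmp.length : Int) - 1) 1).foldl (stepA tmp) test0A

def loop3A (test : PySem.Dict Char Int) : String :=
  (PySem.List.pyRange 0 (test.size : Int) 2).foldl (fun answer i =>
    let firstKey := PySem.List.pyGetD test.keys i ' '
    let secondKey := PySem.List.pyGetD test.keys (i + 1) ' '
    let firstValue := test.getD firstKey 0
    let secondValue := test.getD secondKey 0
    if firstValue > secondValue then answer ++ String.ofList [firstKey]
    else if firstValue < secondValue then answer ++ String.ofList [secondKey]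
    else answer ++ String.ofList [firstKey]) ""

def net0B : PySem.Dict String Int :=
  PySem.Dict.ofList (pairsB.map (fun ab => (String.ofList [ab.1, ab.2], (0 : Int))))

def loopB (survey : List String) (choices : List Int) : PySem.Dict String Int :=
  (PySem.List.pyRange 0 (survey.length : Int) 1).foldl (fun net i =>
    if PySem.List.pyGetD choices i 0 > 4 then
      let ps := (sideB.get? ((PySem.Str.pyGet? (PySem.List.pyGetD survey i "") 1).getD ' ')).getD ("", 0)
      net.modify ps.1 0 (· + ps.2 * scoreDictB.getD (PySem.List.pyGetD choices i 0) 0)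
    else if PySem.List.pyGetD choices i 0 < 4 then
      let ps := (sideB.get? ((PySem.Str.pyGet? (PySem.List.pyGetD survey i "") 0).getD ' ')).getD ("", 0)
      net.modify ps.1 0 (· + ps.2 * scoreDictB.getD (PySem.List.pyGetD choices i 0) 0)
    else net) net0B

def joinB (net : PySem.Dict String Int) : String :=
  PySem.Str.join "" (pairsB.map (fun ab =>
    if net.getD (String.ofList [ab.1, ab.2]) 0 ≥ 0 then String.ofList [ab.1]
    else String.ofList [ab.2]))

theorem loop1A_eq (survey : List String) (choices : List Int)
    (h : survey.length ≤ choices.length) :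
    loop1A survey choices = encode ((survey.zip choices).flatMap contrib) := by
  have h1 :
      loop1A survey choices = (survey.zip choices).foldl bodyA [] :=
    foldl_range_zip (fun acc a b =>
      if b > 4 then
        acc ++ [Sum.inl ((PySem.Str.pyGet? a 1).getD ' '), Sum.inr (scoreDictA.getD b 0)]
      else if b < 4 then
        acc ++ [Sum.inl ((PySem.Str.pyGet? a 0).getD ' '), Sum.inr (scoreDictA.getD b 0)]
      else acc) "" 0 survey choices h []
  rw [h1, tmp_eq, List.nil_append]

theorem loopB_eq (survey : List String) (choices : List Int)
    (h : survey.length ≤ choices.length) :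
    loopB survey choices = (survey.zip choices).foldl netStep net0B := by
  unfold loopB
  exact foldl_range_zip (g := fun net a b =>
    if b > 4 then
      let ps := (sideB.get? ((PySem.Str.pyGet? a 1).getD ' ')).getD ("", 0)
      net.modify ps.1 0 (· + ps.2 * scoreDictB.getD b 0)
    else if b < 4 then
      let ps := (sideB.get? ((PySem.Str.pyGet? a 0).getD ' ')).getD ("", 0)
      net.modify ps.1 0 (· + ps.2 * scoreDictB.getD b 0)
    else net) "" 0 survey choices h net0B

theorem loop3A_eval (test : PySem.Dict Char Int) (hk : test.keys = pvLetters) :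
    loop3A test
      = (((("" ++ (if test.getD 'R' 0 - test.getD 'T' 0 ≥ 0 then String.ofList ['R'] else String.ofList ['T']))
          ++ (if test.getD 'C' 0 - test.getD 'F' 0 ≥ 0 then String.ofList ['C'] else String.ofList ['F']))
          ++ (if test.getD 'J' 0 - test.getD 'M' 0 ≥ 0 then String.ofList ['J'] else String.ofList ['M']))
          ++ (if test.getD 'A' 0 - test.getD 'N' 0 ≥ 0 then String.ofList ['A'] else String.ofList ['N'])) := by
  unfold loop3A
  have hsize : (test.size : Int) = 8 := by
    have := congrArg List.length hk
    simp only [PySem.Dict.keys, List.length_map] at this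
    simp [PySem.Dict.size, this, pvLetters]
  rw [hsize, show PySem.List.pyRange 0 8 2 = [0, 2, 4, 6] from by decide]
  simp only [List.foldl_cons, List.foldl_nil]
  rw [hk]
  simp only [show PySem.List.pyGetD pvLetters (0 : Int) ' ' = 'R' from by decide,
    show PySem.List.pyGetD pvLetters ((0 : Int) + 1) ' ' = 'T' from by decide,
    show PySem.List.pyGetD pvLetters (2 : Int) ' ' = 'C' from by decide,
    show PySem.List.pyGetD pvLetters ((2 : Int) + 1) ' ' = 'F' from by decide,
    show PySem.List.pyGetD pvLetters (4 : Int) ' ' = 'J' from by decide,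
    show PySem.List.pyGetD pvLetters ((4 : Int) + 1) ' ' = 'M' from by decide,
    show PySem.List.pyGetD pvLetters (6 : Int) ' ' = 'A' from by decide,
    show PySem.List.pyGetD pvLetters ((6 : Int) + 1) ' ' = 'N' from by decide]
  simp only [pickA]

theorem joinB_eval (net : PySem.Dict String Int) :
    joinB net
      = (((("" ++ (if net.getD "RT" 0 ≥ 0 then String.ofList ['R'] else String.ofList ['T']))
          ++ (if net.getD "CF" 0 ≥ 0 then String.ofList ['C'] else String.ofList ['F']))
          ++ (if net.getD "JM" 0 ≥ 0 then String.ofList ['J'] else String.ofList ['M']))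
          ++ (if net.getD "AN" 0 ≥ 0 then String.ofList ['A'] else String.ofList ['N'])) := by
  unfold joinB
  simp only [pairsB, List.map_cons, List.map_nil]
  rw [join4,
    show String.ofList ['R', 'T'] = "RT" from by decide,
    show String.ofList ['C', 'F'] = "CF" from by decide,
    show String.ofList ['J', 'M'] = "JM" from by decide,
    show String.ofList ['A', 'N'] = "AN" from by decide]

-- ===== VERDICT (by name: the statement is the Claim_ definition above) =====
theorem solution_spec : Claim_equal_solution := by
  unfold Claim_equal_solution
  intro survey choices _ hpre
  obtain ⟨hlen, hok⟩ := hpre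
  unfold Spec_solution
  have hA : solution survey choices = loop3A (loop2A (loop1A survey choices)) := rfl
  have hB : solution_alt survey choices = joinB (loopB survey choices) := rfl
  obtain ⟨hkeys, hr1, hr2, hr3, hr4⟩ :=
    main_inv (survey.zip choices) test0A net0B hok
      (by decide) (by unfold rel; refine ⟨by decide, by decide, by decide, by decide⟩)
  rw [hA, hB, loop1A_eq survey choices hlen, loopB_eq survey choices hlen]
  unfold loop2A
  rw [loop2_eq]
  rw [loop3A_eval _ hkeys, joinB_eval, hr1, hr2, hr3, hr4]
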